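-- pv_equiv track=rewrite | github.com/hcheorii/programmers_algorithm | lev_1/소수 만들기/main.py | solution
-- ===== SOURCE A (Python) =====
-- from itertools import combinations, permutations
-- import math
--
-- def solution(nums):
--     def is_prime_number(x):
--         for i in range(2, int(math.sqrt(x)) + 1):
--             if x % i == 0:
--                 return False
--         return True
--     answer = 0
--     li = []
--     perm = list(combinations(nums, 3))
--
--     for i in range(len(perm)):
--         li.append(sum(perm[i]))
--
--     for i in range(len(li)):
--         if(is_prime_number(li[i]) == True):
--             answer += 1
--
--     return answer
-- ===== SOURCE B (Python) =====
-- import math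
--
-- def solution(nums):
--     def is_prime_number(x):
--         for i in range(2, int(math.sqrt(x)) + 1):
--             if x % i == 0:
--                 return False
--         return True
--     # subset-sum DP: cJ[s] = number of ways to choose exactly J elements summing to s
--     c1, c2, c3 = {}, {}, {}
--     for num in nums:
--         for s, k in list(c2.items()):
--             c3[s + num] = c3.get(s + num, 0) + k
--         for s, k in list(c1.items()):
--             c2[s + num] = c2.get(s + num, 0) + k
--         c1[num] = c1.get(num, 0) + 1
--     answer = 0
--     for s, k in c3.items():
--         if is_prime_number(s):
--             answer += k
--     return answer
-- ===== Notes on version B (the rewrite author's own statement) =====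
-- stated objective: faster
-- what changed: Replaces itertools-style enumeration of all C(n,3) 3-combinations with a one-pass subset-sum DP over dicts (ways to pick exactly 1/2/3 elements per sum), so primality is tested once per distinct 3-subset sum instead of once per combination.
import Mathlib
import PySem

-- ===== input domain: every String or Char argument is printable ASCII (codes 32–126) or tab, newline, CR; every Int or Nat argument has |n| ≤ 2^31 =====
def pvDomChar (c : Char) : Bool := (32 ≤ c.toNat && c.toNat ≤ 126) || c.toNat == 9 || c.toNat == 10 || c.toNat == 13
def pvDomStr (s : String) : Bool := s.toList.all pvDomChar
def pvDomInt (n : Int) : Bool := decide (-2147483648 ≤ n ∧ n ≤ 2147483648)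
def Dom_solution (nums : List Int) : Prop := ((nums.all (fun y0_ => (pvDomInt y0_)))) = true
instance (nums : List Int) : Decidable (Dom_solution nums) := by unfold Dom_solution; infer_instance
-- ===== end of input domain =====

-- B replaces the enumeration of all 3-combinations with a one-pass subset-sum DP over dicts of
-- per-sum counts (primality tested once per distinct triple sum); same return value wherever A returns.

-- ===== PORT A =====
-- is_prime_number(x): trial division over range(2, int(math.sqrt(x)) + 1); on the admitted inputs
-- every tested x satisfies 0 ≤ x ≤ 3·2^31 < 2^52, where int(math.sqrt(x)) = Nat.sqrt x.toNat exactly.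
def isPrimeA (x : Int) : Bool :=
  (PySem.List.pyRange 2 ((Nat.sqrt x.toNat : Int) + 1) 1).all (fun i => !(PySem.Int.mod x i == 0))
-- itertools.combinations(nums, 3) as 3-tuples in emission order, built head-first
def comb2 : List Int → List (Int × Int)
  | [] => []
  | x :: xs => xs.map (fun a => (x, a)) ++ comb2 xs
def comb3 : List Int → List (Int × Int × Int)
  | [] => []
  | x :: xs => (comb2 xs).map (fun p => (x, p.1, p.2)) ++ comb3 xs
def solution (nums : List Int) : Int :=
  let perm := comb3 nums
  let li := perm.map (fun t => t.1 + t.2.1 + t.2.2)   -- the index loop appending sum(perm[i])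
  li.foldl (fun answer s => if isPrimeA s = true then answer + 1 else answer) 0
-- ===== PORT B =====
-- Source B's is_prime_number (Source B carries a verbatim copy of the predicate)
def isPrimeB (x : Int) : Bool :=
  (PySem.List.pyRange 2 ((Nat.sqrt x.toNat : Int) + 1) 1).all (fun i => !(PySem.Int.mod x i == 0))
-- 'for s, k in list(src.items()): dst[s+num] = dst.get(s+num, 0) + k'
def bump (num : Int) (src dst : PySem.Dict Int Int) : PySem.Dict Int Int :=
  src.items.foldl (fun d sk => d.insert (sk.1 + num) (d.getD (sk.1 + num) 0 + sk.2)) dst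
-- the body of 'for num in nums'
def dpStep (st : PySem.Dict Int Int × PySem.Dict Int Int × PySem.Dict Int Int) (num : Int) :
    PySem.Dict Int Int × PySem.Dict Int Int × PySem.Dict Int Int :=
  let c3 := bump num st.2.1 st.2.2
  let c2 := bump num st.1 st.2.1
  let c1 := st.1.insert num (st.1.getD num 0 + 1)
  (c1, c2, c3)
def solution_alt (nums : List Int) : Int :=
  let st := nums.foldl dpStep (PySem.Dict.empty, PySem.Dict.empty, PySem.Dict.empty)
  st.2.2.items.foldl (fun answer sk => if isPrimeB sk.1 = true then answer + sk.2 else answer) 0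


-- ===== PRECONDITION & SPEC =====
-- Pre_ excludes exactly the inputs where A raises: with ≥ 3 elements whose three smallest sum below 0,
-- some 3-combination has a negative sum and math.sqrt raises ValueError (B raises there too).
def Pre_solution (nums : List Int) : Prop :=
  nums.length < 3 ∨ 0 ≤ (((PySem.List.sorted nums (fun x => x) false).take 3).sum)
instance (nums : List Int) : Decidable (Pre_solution nums) := by unfold Pre_solution; infer_instance
def pvWitness_solution : List Int := ([1, 2, 7, 6, 4])

def Spec_solution (nums : List Int) (out : Int) : Prop := out = solution_alt nums
instance (nums : List Int) (out : Int) : Decidable (Spec_solution nums out) := by unfold Spec_solution; infer_instance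

-- ===== CLAIM (what is proved, stated in full; the proofs are below) =====
def Claim_equal_solution : Prop := ∀ (nums : List Int), Dom_solution nums → Pre_solution nums → Spec_solution nums (solution nums)

-- ===== LEMMAS AND PROOFS =====

-- sums of the 2- and 3-element combinations of l
def S2 (l : List Int) : List Int := (comb2 l).map (fun p => p.1 + p.2)
def S3 (l : List Int) : List Int := (comb3 l).map (fun t => t.1 + t.2.1 + t.2.2)

lemma count_map_add (c s : Int) (m : List Int) :
    (m.map (fun y => c + y)).count s = m.count (s - c) := by
  have h : s = c + (s - c) := by omega
  rw [h]
  have := List.count_map_of_injective (x := s - c) m (fun y => c + y)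
    (fun u v huv => by dsimp at huv; omega)
  simpa using this

lemma count_S2_append (l : List Int) (x s : Int) :
    (S2 (l ++ [x])).count s = (S2 l).count s + l.count (s - x) := by
  induction l with
  | nil => simp [S2, comb2]
  | cons a t ih =>
      simp only [S2, comb2, List.cons_append, List.map_append, List.count_append, List.map_map] at *
      have hc : ((fun p : Int × Int => p.1 + p.2) ∘ fun b => (a, b)) = (fun y => a + y) := by
        funext b; simp
      rw [hc, ih, count_map_add, count_map_add]
      simp [List.count_cons]
      have hiff : x = s - a ↔ a = s - x := by omega
      split_ifs with h1 h2 <;> omega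

lemma count_S3_append (l : List Int) (x s : Int) :
    (S3 (l ++ [x])).count s = (S3 l).count s + (S2 l).count (s - x) := by
  induction l with
  | nil => simp [S3, S2, comb3, comb2]
  | cons a t ih =>
      simp only [S3, S2, comb3, comb2, List.cons_append, List.map_append, List.count_append, List.map_map] at *
      have hc : ((fun t : Int × Int × Int => t.1 + t.2.1 + t.2.2) ∘ fun p : Int × Int => (a, p.1, p.2))
          = (fun y => a + y) ∘ (fun p : Int × Int => p.1 + p.2) := by
        funext p; simp; ring
      rw [hc, ih, ← List.map_map, count_map_add, ← List.map_map, count_map_add]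
      have h2 := count_S2_append t x (s - a)
      simp only [S2] at h2
      rw [h2]
      have hc2 : ((fun p : Int × Int => p.1 + p.2) ∘ fun b => (a, b)) = (fun y => a + y) := by
        funext b; simp
      rw [hc2, count_map_add]
      have : s - a - x = s - x - a := by omega
      rw [this]; omega

lemma foldl_insert_shift_getD (K : List Int) (hK : K.Nodup) (g : Int → Int) (x : Int)
    (dst : PySem.Dict Int Int) (s : Int) :
    (K.foldl (fun d k => d.insert (k + x) (d.getD (k + x) 0 + g k)) dst).getD s 0
      = dst.getD s 0 + (if s - x ∈ K then g (s - x) else 0) := by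
  induction K generalizing dst with
  | nil => simp
  | cons k K' ih =>
      simp only [List.foldl_cons]
      rw [ih (List.Nodup.of_cons hK)]
      rw [PySem.Dict.getD_insert]
      by_cases h1 : s = k + x
      · have hnotin : k ∉ K' := (List.nodup_cons.mp hK).1
        subst h1
        have hk : k + x - x = k := by omega
        rw [if_pos rfl, hk, if_neg hnotin, if_pos (List.mem_cons_self)]
        ring
      · have h2 : ¬ (s - x = k) := by omega
        rw [if_neg h1]
        by_cases h3 : s - x ∈ K'
        · rw [if_pos h3, if_pos (List.mem_cons_of_mem k h3)]
        · rw [if_neg h3, if_neg (by simp [List.mem_cons, h2, h3])]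

lemma bump_getD (num : Int) (src dst : PySem.Dict Int Int) (hnd : src.keys.Nodup) (s : Int) :
    (bump num src dst).getD s 0 = dst.getD s 0 + src.getD (s - num) 0 := by
  unfold bump
  rw [PySem.Dict.items_eq_map_keys src hnd 0, List.foldl_map]
  rw [foldl_insert_shift_getD src.keys hnd (fun k => src.getD k 0) num dst s]
  by_cases h : s - num ∈ src.keys
  · simp [h]
  · have : src.getD (s - num) 0 = 0 := by
      apply PySem.Dict.getD_of_not_contains
      rw [PySem.Dict.contains_eq_decide_mem_keys]; simp [h]
    simp [h, this]

lemma bump_keys_mem (num : Int) (src dst : PySem.Dict Int Int) (s : Int) :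
    s ∈ (bump num src dst).keys ↔ s ∈ dst.keys ∨ s - num ∈ src.keys := by
  unfold bump
  rw [PySem.Dict.keys_foldl_insert_key]
  rw [PySem.Set.mem_update]
  constructor
  · rintro (h | h)
    · exact Or.inl h
    · right
      simp only [List.mem_map] at h
      obtain ⟨⟨k1, v1⟩, hsk, rfl⟩ := h
      have he : k1 + num - num = k1 := by omega
      rw [he]
      simp only [PySem.Dict.keys]
      exact List.mem_map_of_mem hsk
  · rintro (h | h)
    · exact Or.inl h
    · right
      simp only [PySem.Dict.keys, List.mem_map] at h ⊢
      obtain ⟨⟨k1, v1⟩, hsk, hk⟩ := h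
      refine ⟨(k1, v1), hsk, ?_⟩
      dsimp only
      dsimp only at hk
      omega

lemma bump_keys_nodup (num : Int) (src dst : PySem.Dict Int Int) (h : dst.keys.Nodup) :
    (bump num src dst).keys.Nodup := by
  unfold bump
  exact PySem.Dict.nodup_keys_foldl_insert_key src.items (fun sk : Int × Int => sk.1 + num) _ dst h

def DictCounts (d : PySem.Dict Int Int) (m : List Int) : Prop :=
  d.keys.Nodup ∧ (∀ s, d.getD s 0 = (m.count s : Int)) ∧ (∀ s, s ∈ d.keys ↔ s ∈ m)

lemma dp_invariant (l : List Int) :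
    DictCounts (l.foldl dpStep (PySem.Dict.empty, PySem.Dict.empty, PySem.Dict.empty)).1 l
    ∧ DictCounts (l.foldl dpStep (PySem.Dict.empty, PySem.Dict.empty, PySem.Dict.empty)).2.1 (S2 l)
    ∧ DictCounts (l.foldl dpStep (PySem.Dict.empty, PySem.Dict.empty, PySem.Dict.empty)).2.2 (S3 l) := by
  induction l using List.reverseRecOn with
  | nil =>
      refine ⟨⟨?_, ?_, ?_⟩, ⟨?_, ?_, ?_⟩, ⟨?_, ?_, ?_⟩⟩ <;>
        simp [S2, S3, comb2, comb3, PySem.Dict.keys_empty, PySem.Dict.getD_empty]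
  | append_singleton l x ih =>
      obtain ⟨⟨n1, g1, m1⟩, ⟨n2, g2, m2⟩, ⟨n3, g3, m3⟩⟩ := ih
      rw [List.foldl_append]
      set st := l.foldl dpStep (PySem.Dict.empty, PySem.Dict.empty, PySem.Dict.empty) with hst
      simp only [List.foldl_cons, List.foldl_nil]
      dsimp only [dpStep]
      refine ⟨⟨?_, ?_, ?_⟩, ⟨?_, ?_, ?_⟩, ⟨?_, ?_, ?_⟩⟩
      · exact PySem.Dict.nodup_keys_insert st.1 x _ n1
      · intro s
        rw [PySem.Dict.getD_insert]
        by_cases h : s = x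
        · subst h
          rw [if_pos rfl, g1 s]
          simp [List.count_append]
        · rw [if_neg h, g1 s]
          simp [List.count_append, List.count_singleton]
          omega
      · intro s
        rw [PySem.Dict.mem_keys_insert, m1 s]
        simp [List.mem_append]
        tauto
      · exact bump_keys_nodup x st.1 st.2.1 n2
      · intro s
        rw [bump_getD x st.1 st.2.1 n1 s, g2 s, g1 (s - x), count_S2_append]
        push_cast; ring
      · intro s
        rw [bump_keys_mem, m2 s, m1 (s - x),
          ← List.count_pos_iff, ← List.count_pos_iff, ← List.count_pos_iff, count_S2_append]
        omega
      · exact bump_keys_nodup x st.2.1 st.2.2 n3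
      · intro s
        rw [bump_getD x st.2.1 st.2.2 n2 s, g3 s, g2 (s - x), count_S3_append]
        push_cast; ring
      · intro s
        rw [bump_keys_mem, m3 s, m2 (s - x),
          ← List.count_pos_iff, ← List.count_pos_iff, ← List.count_pos_iff, count_S3_append]
        omega

lemma foldl_if_add (K : List Int) (p : Int → Bool) (g : Int → Int) (init : Int) :
    K.foldl (fun a k => if p k = true then a + g k else a) init
      = init + ((K.filter p).map g).sum := by
  induction K generalizing init with
  | nil => simp
  | cons k K' ih =>
      simp only [List.foldl_cons, List.filter_cons]
      by_cases h : p k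
      · rw [if_pos h, ih, if_pos h]; simp; ring
      · rw [if_neg h, ih, if_neg h]

lemma solution_eq_alt (nums : List Int) : solution nums = solution_alt nums := by
  dsimp only [solution, solution_alt]
  rw [PySem.List.foldl_if_add_one (fun s => isPrimeA s)]
  obtain ⟨_, _, ⟨n3, g3, m3⟩⟩ := dp_invariant nums
  set st := nums.foldl dpStep (PySem.Dict.empty, PySem.Dict.empty, PySem.Dict.empty) with hst
  rw [PySem.Dict.items_eq_map_keys st.2.2 n3 0, List.foldl_map]
  dsimp only
  rw [foldl_if_add st.2.2.keys (fun k => isPrimeB k) (fun k => st.2.2.getD k 0) 0]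
  have hperm : st.2.2.keys.Perm (S3 nums).dedup :=
    (List.perm_ext_iff_of_nodup n3 (List.nodup_dedup _)).mpr
      (fun a => by rw [m3 a, List.mem_dedup])
  have hpf : (st.2.2.keys.filter (fun k => isPrimeB k)).Perm
      ((S3 nums).dedup.filter (fun k => isPrimeB k)) := hperm.filter _
  have hmap : ((st.2.2.keys.filter (fun k => isPrimeB k)).map (fun k => st.2.2.getD k 0))
      = ((st.2.2.keys.filter (fun k => isPrimeB k)).map (fun k => ((S3 nums).count k : Int))) :=
    List.map_congr_left (fun k _ => g3 k)
  rw [hmap]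
  have hsum : ((st.2.2.keys.filter (fun k => isPrimeB k)).map (fun k => ((S3 nums).count k : Int))).sum
      = (((S3 nums).dedup.filter (fun k => isPrimeB k)).map (fun k => ((S3 nums).count k : Int))).sum :=
    (hpf.map _).sum_eq
  rw [hsum]
  have hfin : (((S3 nums).dedup.filter (fun k => isPrimeB k)).map (fun k => ((S3 nums).count k : Int))).sum
      = (((S3 nums).countP (fun k => isPrimeB k) : Nat) : Int) := by
    rw [← List.sum_map_count_dedup_filter_eq_countP (fun k => isPrimeB k) (S3 nums)]
    push_cast
    rw [List.map_map]
    rfl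
  rw [hfin]
  have : isPrimeB = isPrimeA := rfl
  rw [this]
  rfl

-- ===== VERDICT (by name: the statement is the Claim_ definition above) =====
theorem solution_spec : Claim_equal_solution := by
  intro nums _hDom _hPre
  exact solution_eq_alt nums
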